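-- pv_equiv track=rewrite | github.com/SHANAVAZ900/CP-2 | 11-bonusplaythreediceyahtzee-Python/bonusplaythreediceyahtzee.py | armstep
-- ===== SOURCE A (Python) =====
-- def armstep(arm, dice):
--     arm1 = list(armtodice(arm))
--     temp = 0
--     for x in arm1:
--         if arm1.count(x) > 1:
--             arm1 = [val for val in arm1 if val == x]
--     temp = 3-len(arm1)
--
--     if len(arm1) == 3:
--         arm1 = [max(arm1)]
--         temp = 3-len(arm1)
--
--     while temp > 0:
--         q = dice % 10
--         dice //= 10
--         arm1.append(q)
--         temp -= 1
--
--     return order_dice(arm1[0], arm1[1], arm1[2]), dice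
--
-- def armtodice(arm):
--     arm = str(arm)
--     return (int(arm[0]), int(arm[1]), int(arm[2]))
--
-- def order_dice(a, b, c):
--     arm = [a, b, c]
--     high_pos = arm.index(max(arm))
--     lowe_pos = arm.index(min(arm))
--
--     mid_pos = [ind for ind in [0, 1, 2] if ind not in [high_pos, lowe_pos]][0]
--     return arm[high_pos] * 100 + arm[mid_pos] * 10 + arm[lowe_pos]
-- ===== SOURCE B (Python) =====
-- def armstep(arm, dice):
--     # Histogram/counting-sort formulation: the three arm digits are tallied into a
--     # 0..9 count table; the keep decision, the rerolls and the final descending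
--     # ordering all operate on the table (no dice list, no sort, no index scans).
--     s = str(arm)
--     counts = [0] * 10
--     for ch in (s[0], s[1], s[2]):
--         counts[int(ch)] += 1
--     if 2 in counts:
--         keep = [2 * (c == 2) for c in counts]
--     else:
--         hi = max(d for d in range(10) if counts[d] > 0)
--         keep = [int(d == hi) for d in range(10)]
--     for _ in range(3 - sum(keep)):
--         keep[dice % 10] += 1
--         dice //= 10
--     result = 0
--     for d in range(9, -1, -1):
--         for _ in range(keep[d]):
--             result = 10 * result + d
--     return result, dice
-- ===== Notes on version B (the rewrite author's own statement) =====
-- stated objective: alternative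
-- what changed: B recasts the whole step as a counting sort: the three arm digits are tallied into a 0..9 histogram, the keep decision reads the table ('2 in counts' keeps the pair, otherwise the highest occupied bucket), rerolled digits are added as bucket increments, and the result is emitted by scanning bucket values 9 down to 0 - no dice list, no comparison sort, no count/filter or index-of-max scans.
import Mathlib
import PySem

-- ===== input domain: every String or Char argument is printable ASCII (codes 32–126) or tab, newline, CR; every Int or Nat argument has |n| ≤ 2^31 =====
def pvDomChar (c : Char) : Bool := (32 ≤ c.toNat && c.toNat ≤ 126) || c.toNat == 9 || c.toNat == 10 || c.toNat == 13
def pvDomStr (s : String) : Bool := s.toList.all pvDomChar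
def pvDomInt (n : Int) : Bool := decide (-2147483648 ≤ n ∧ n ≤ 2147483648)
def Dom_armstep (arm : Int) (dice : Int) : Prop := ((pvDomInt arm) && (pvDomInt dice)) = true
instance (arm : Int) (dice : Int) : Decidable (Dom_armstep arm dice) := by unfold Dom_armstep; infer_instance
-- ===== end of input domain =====

-- B re-casts the whole step as a counting sort: the arm digits are tallied into a 0..9 histogram
-- and the keep decision, the rerolls and the final descending ordering all work on that table
-- (objective: alternative — no dice list, no comparison sort, no index scans).

-- ===== PORT A =====
-- armtodice: str(arm), int() of each of the first three characters.  Where Python raises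
-- (arm < 100: IndexError, or ValueError on '-'), the Option is defaulted to 0 — excluded by Pre_.
def armtodice (arm : Int) : Int × Int × Int :=
  let s := PySem.Int.toChars arm
  (((PySem.List.pyGet? s 0).bind (fun ch => PySem.Int.ofChars? [ch])).getD 0,
   ((PySem.List.pyGet? s 1).bind (fun ch => PySem.Int.ofChars? [ch])).getD 0,
   ((PySem.List.pyGet? s 2).bind (fun ch => PySem.Int.ofChars? [ch])).getD 0)

-- order_dice: position of max, position of min, the remaining position; positions as Nat,
-- arm[i] via getD (always in range: index? succeeds on a member of a 3-list).
def order_dice (a : Int) (b : Int) (c : Int) : Int :=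
  let arm := [a, b, c]
  let high_pos := ((PySem.List.max? arm (fun v => v)).bind (fun m => PySem.List.index? arm m)).getD 0
  let lowe_pos := ((PySem.List.min? arm (fun v => v)).bind (fun m => PySem.List.index? arm m)).getD 0
  let mid_pos := (([0, 1, 2].filter (fun ind => ¬ (ind ∈ [high_pos, lowe_pos]))).headD 0 : Nat)
  arm.getD high_pos 0 * 100 + arm.getD mid_pos 0 * 10 + arm.getD lowe_pos 0

-- 'while temp > 0': pop low digits of dice onto arm1, temp times
def armstepWhile : Nat → List Int → Int → List Int × Int
  | 0, arm1, dice => (arm1, dice)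
  | t + 1, arm1, dice => armstepWhile t (arm1 ++ [PySem.Int.mod dice 10]) (PySem.Int.floordiv dice 10)

def armstep (arm : Int) (dice : Int) : Int × Int :=
  let t := armtodice arm
  let arm1 := [t.1, t.2.1, t.2.2]
  -- 'for x in arm1: if arm1.count(x) > 1: arm1 = [val for val in arm1 if val == x]' iterates over
  -- the ORIGINAL list object while rebinding arm1: a foldl over the original elements whose state
  -- is the current arm1.
  let arm2 := arm1.foldl
    (fun cur x => if 1 < PySem.List.count cur x then cur.filter (fun v => v == x) else cur) arm1
  let arm3 := if arm2.length = 3 then [(PySem.List.max? arm2 (fun v => v)).getD 0] else arm2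
  let r := armstepWhile (3 - arm3.length) arm3 dice
  (order_dice (r.1.getD 0 0) (r.1.getD 1 0) (r.1.getD 2 0), r.2)

-- ===== PORT B =====
-- 'for _ in range(3 - sum(keep))' reroll loop of Source B: n iterations updating (keep, dice);
-- keep[dice % 10] += 1 is a modify at index dice % 10 ∈ 0..9, always in range.
def altFill : Nat → List Int → Int → List Int × Int
  | 0, keep, dice => (keep, dice)
  | n + 1, keep, dice =>
      altFill n (keep.modify (PySem.Int.mod dice 10).toNat (· + 1)) (PySem.Int.floordiv dice 10)

def armstep_alt (arm : Int) (dice : Int) : Int × Int :=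
  -- counts: tally int(ch) for ch in (s[0], s[1], s[2]); s[i] raising IndexError and int(ch)
  -- raising ValueError are defaulted ('?', 0) — unreachable under Pre_.
  let s := PySem.Int.toChars arm
  let counts := [(PySem.List.pyGet? s 0).getD '?', (PySem.List.pyGet? s 1).getD '?',
      (PySem.List.pyGet? s 2).getD '?'].foldl
    (fun cur ch => cur.modify ((PySem.Int.ofChars? [ch]).getD 0).toNat (· + 1))
    (List.replicate 10 (0:Int))
  -- '2 in counts' / '[2 * (c == 2) for c in counts]' / 'max(d for d in range(10) if counts[d] > 0)'
  let keep :=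
    if counts.contains 2 then counts.map (fun c => if c == 2 then (2:Int) else 0)
    else
      let hi := (PySem.List.max? ((PySem.List.pyRange 0 10 1).filter
                  (fun d => decide (0 < counts.getD d.toNat 0))) (fun v => v)).getD 0
      (PySem.List.pyRange 0 10 1).map (fun d => if d == hi then (1:Int) else 0)
  let r := altFill (3 - keep.sum).toNat keep dice
  -- 'for d in range(9, -1, -1): for _ in range(keep[d]): result = 10 * result + d'
  let result := (PySem.List.pyRange 9 (-1) (-1)).foldl
    (fun acc d => (List.range ((r.1.getD d.toNat 0).toNat)).foldl (fun a2 _ => 10 * a2 + d) acc) 0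
  (result, r.2)

-- ===== PRECONDITION & SPEC =====
-- Pre_ excludes exactly the inputs on which Python A raises: for arm < 100, str(arm) has fewer
-- than three characters (IndexError) or starts with '-' (ValueError in int()).
def Pre_armstep (arm : Int) (dice : Int) : Prop := 100 ≤ arm
instance (arm : Int) (dice : Int) : Decidable (Pre_armstep arm dice) := by unfold Pre_armstep; infer_instance
def pvWitness_armstep : Int × Int := (123, 456)

def Spec_armstep (arm : Int) (dice : Int) (out : Int × Int) : Prop := out = armstep_alt arm dice
instance (arm : Int) (dice : Int) (out : Int × Int) : Decidable (Spec_armstep arm dice out) := by unfold Spec_armstep; infer_instance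

-- ===== CLAIM =====
def Claim_equal_armstep : Prop := ∀ (arm : Int) (dice : Int), Dom_armstep arm dice → Pre_armstep arm dice → Spec_armstep arm dice (armstep arm dice)

-- ===== LEMMAS AND PROOFS =====

-- proof-layer names for the stages of the two pipelines (definitionally equal to the ports' subterms)
def zerosH : List Int := List.replicate 10 0
def histOf (l : List Int) : List Int := l.foldl (fun h v => h.modify v.toNat (· + 1)) zerosH
def keptA (x y z : Int) : List Int :=
  if (x = y ∧ y = z) ∨ (x ≠ y ∧ y ≠ z ∧ x ≠ z) then [max x (max y z)]
  else if x = y ∨ x = z then [x, x] else [y, y]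
def countsOf3 (x y z : Int) : List Int :=
  ((zerosH.modify x.toNat (· + 1)).modify y.toNat (· + 1)).modify z.toNat (· + 1)
def stageA (x y z : Int) : List Int :=
  let arm1 := [x, y, z]
  let arm2 := arm1.foldl
    (fun cur w => if 1 < PySem.List.count cur w then cur.filter (fun v => v == w) else cur) arm1
  if arm2.length = 3 then [(PySem.List.max? arm2 (fun v => v)).getD 0] else arm2
def Bkeep (counts : List Int) : List Int :=
  if counts.contains 2 then counts.map (fun c => if c == 2 then (2:Int) else 0)
  else
    let hi := (PySem.List.max? ((PySem.List.pyRange 0 10 1).filter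
                (fun d => decide (0 < counts.getD d.toNat 0))) (fun v => v)).getD 0
    (PySem.List.pyRange 0 10 1).map (fun d => if d == hi then (1:Int) else 0)
def emitB (keep : List Int) : Int :=
  (PySem.List.pyRange 9 (-1) (-1)).foldl
    (fun acc d => (List.range ((keep.getD d.toNat 0).toNat)).foldl (fun a2 _ => 10 * a2 + d) acc) 0

-- all stage facts about three digits in 0..9, in one 1000-case kernel sweep
set_option maxHeartbeats 4000000 in
theorem bigCase (x y z : Int) (hx0 : 0 ≤ x) (hx9 : x ≤ 9) (hy0 : 0 ≤ y) (hy9 : y ≤ 9)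
    (hz0 : 0 ≤ z) (hz9 : z ≤ 9) :
    stageA x y z = keptA x y z ∧
    Bkeep (countsOf3 x y z) = histOf (keptA x y z) ∧
    (3 - (histOf (keptA x y z)).sum).toNat = 3 - (keptA x y z).length ∧
    emitB (histOf [x, y, z]) = order_dice x y z := by
  interval_cases x <;> interval_cases y <;> interval_cases z <;> decide

-- pulling a low digit of dice: on the histogram side a modify, on the list side an append
theorem histOf_append (l : List Int) (q : Int) :
    histOf (l ++ [q]) = (histOf l).modify q.toNat (· + 1) := by
  simp [histOf, List.foldl_append]

-- B's reroll loop is A's while loop viewed through histOf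
theorem fill_bridge : ∀ (n : Nat) (l : List Int) (d : Int),
    altFill n (histOf l) d = (histOf (armstepWhile n l d).1, (armstepWhile n l d).2) := by
  intro n
  induction n with
  | zero => intro l d; simp [altFill, armstepWhile]
  | succ n ih =>
      intro l d
      show altFill n ((histOf l).modify (PySem.Int.mod d 10).toNat (· + 1)) _ = _
      rw [← histOf_append, ih, armstepWhile]

-- the kept dice are one value (the max) or a pair, always digits 0..9
theorem keptA_shape (x y z : Int) (hx0 : 0 ≤ x) (hx9 : x ≤ 9) (hy0 : 0 ≤ y) (hy9 : y ≤ 9)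
    (hz0 : 0 ≤ z) (hz9 : z ≤ 9) :
    (∃ m, keptA x y z = [m] ∧ 0 ≤ m ∧ m ≤ 9) ∨
    (∃ v, keptA x y z = [v, v] ∧ 0 ≤ v ∧ v ≤ 9) := by
  unfold keptA
  split_ifs with h1 h2
  · exact Or.inl ⟨_, rfl, by omega, by omega⟩
  · exact Or.inr ⟨x, rfl, hx0, hx9⟩
  · exact Or.inr ⟨y, rfl, hy0, hy9⟩

-- bounds for a pulled digit dice % 10
theorem mod10_bounds (d : Int) : 0 ≤ PySem.Int.mod d 10 ∧ PySem.Int.mod d 10 ≤ 9 :=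
  ⟨PySem.Int.mod_nonneg d (by norm_num), by have := PySem.Int.mod_lt d (b := 10) (by norm_num); omega⟩

-- the two pipelines agree from the digit values on
theorem core (x y z dice : Int) (hx0 : 0 ≤ x) (hx9 : x ≤ 9) (hy0 : 0 ≤ y) (hy9 : y ≤ 9)
    (hz0 : 0 ≤ z) (hz9 : z ≤ 9) :
    (order_dice ((armstepWhile (3 - (stageA x y z).length) (stageA x y z) dice).1.getD 0 0)
                ((armstepWhile (3 - (stageA x y z).length) (stageA x y z) dice).1.getD 1 0)
                ((armstepWhile (3 - (stageA x y z).length) (stageA x y z) dice).1.getD 2 0),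
     (armstepWhile (3 - (stageA x y z).length) (stageA x y z) dice).2)
    =
    (emitB (altFill (3 - (Bkeep (countsOf3 x y z)).sum).toNat (Bkeep (countsOf3 x y z)) dice).1,
     (altFill (3 - (Bkeep (countsOf3 x y z)).sum).toNat (Bkeep (countsOf3 x y z)) dice).2) := by
  obtain ⟨hA, hK, hS, -⟩ := bigCase x y z hx0 hx9 hy0 hy9 hz0 hz9
  rw [hA, hK, hS, fill_bridge]
  obtain ⟨m, hm, hm0, hm9⟩ | ⟨v, hv, hv0, hv9⟩ :=
      keptA_shape x y z hx0 hx9 hy0 hy9 hz0 hz9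
  · rw [hm]
    simp only [List.length_cons, List.length_nil, armstepWhile, List.cons_append,
      List.nil_append]
    obtain ⟨hq10, hq19⟩ := mod10_bounds dice
    obtain ⟨hq20, hq29⟩ := mod10_bounds (PySem.Int.floordiv dice 10)
    obtain ⟨-, -, -, hE⟩ := bigCase m (PySem.Int.mod dice 10)
      (PySem.Int.mod (PySem.Int.floordiv dice 10) 10) hm0 hm9 hq10 hq19 hq20 hq29
    rw [hE]
    simp [order_dice, List.getD]
  · rw [hv]
    simp only [List.length_cons, List.length_nil, armstepWhile, List.cons_append,
      List.nil_append]
    obtain ⟨hq10, hq19⟩ := mod10_bounds dice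
    obtain ⟨-, -, -, hE⟩ := bigCase v v (PySem.Int.mod dice 10) hv0 hv9 hv0 hv9 hq10 hq19
    rw [hE]
    simp [order_dice, List.getD]

-- str(arm) for 100 ≤ arm: at least three characters, all of them decimal digit characters
def DIG : List Char := ['0','1','2','3','4','5','6','7','8','9']

theorem tdc_mem (f : Nat) : ∀ (n : Nat) (l : List Char), (∀ c ∈ l, c ∈ DIG) →
    ∀ c ∈ Nat.toDigitsCore 10 f n l, c ∈ DIG := by
  induction f with
  | zero =>
      intro n l hl c hc
      rw [Nat.toDigitsCore] at hc
      exact hl c hc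
  | succ f ih =>
      intro n l hl c hc
      have hd : (n % 10).digitChar ∈ DIG := by
        have h : n % 10 < 10 := Nat.mod_lt _ (by norm_num)
        set r := n % 10 with hr
        interval_cases r <;> decide
      have hl' : ∀ c ∈ (n % 10).digitChar :: l, c ∈ DIG := by
        intro x hx
        rcases List.mem_cons.mp hx with rfl | hx
        · exact hd
        · exact hl x hx
      rw [Nat.toDigitsCore] at hc
      split at hc
      · exact hl' c hc
      · exact ih _ _ hl' c hc

-- toDigitsCore with fuel left always prepends at least one character
theorem tdc_len (f : Nat) : 1 ≤ f → ∀ (n : Nat) (l : List Char),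
    l.length + 1 ≤ (Nat.toDigitsCore 10 f n l).length := by
  induction f with
  | zero => omega
  | succ f ih =>
      intro _ n l
      rw [Nat.toDigitsCore]
      split
      · simp
      · rcases Nat.eq_zero_or_pos f with rfl | hf
        · rw [Nat.toDigitsCore]; simp
        · have := ih hf (n / 10) ((n % 10).digitChar :: l)
          simp at this; omega

-- with n ≥ 100 and fuel ≥ 3 it prepends at least three
theorem tdc_len3 (f n : Nat) (hf : 3 ≤ f) (hn : 100 ≤ n) (l : List Char) :
    l.length + 3 ≤ (Nat.toDigitsCore 10 f n l).length := by
  obtain ⟨f', rfl⟩ : ∃ f', f = f' + 3 := ⟨f - 3, by omega⟩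
  have h1 : ¬ (n / 10 = 0) := by
    have : 10 * 10 ≤ n := by omega
    have := (Nat.le_div_iff_mul_le (by norm_num : 0 < 10)).mpr this
    omega
  have h2 : ¬ (n / 10 / 10 = 0) := by
    have h10 : 10 ≤ n / 10 := (Nat.le_div_iff_mul_le (by norm_num : 0 < 10)).mpr (by omega)
    have := (Nat.le_div_iff_mul_le (by norm_num : 0 < 10)).mpr (by omega : 1 * 10 ≤ n / 10)
    omega
  rw [Nat.toDigitsCore, if_neg h1, Nat.toDigitsCore, if_neg h2]
  have := tdc_len (f' + 1) (by omega) (n / 10 / 10)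
    ((n / 10 % 10).digitChar :: (n % 10).digitChar :: l)
  simp at this ⊢; omega

theorem toChars_eq (arm : Int) (h : 100 ≤ arm) :
    PySem.Int.toChars arm = Nat.toDigitsCore 10 (arm.toNat + 1) arm.toNat [] := by
  simp [PySem.Int.toChars, show ¬ arm < 0 by omega, Nat.toDigits]

theorem toChars_len3 (arm : Int) (h : 100 ≤ arm) :
    3 ≤ (PySem.Int.toChars arm).length := by
  rw [toChars_eq arm h]
  have := tdc_len3 (arm.toNat + 1) arm.toNat (by omega) (by omega) []
  simpa using this

theorem toChars_dig (arm : Int) (h : 100 ≤ arm) :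
    ∀ c ∈ PySem.Int.toChars arm, c ∈ DIG := by
  rw [toChars_eq arm h]
  exact tdc_mem _ _ _ (by simp)

-- the int() value of a single digit character is its digit, in 0..9
theorem dig_val (c : Char) (hc : c ∈ DIG) :
    0 ≤ (PySem.Int.ofChars? [c]).getD 0 ∧ (PySem.Int.ofChars? [c]).getD 0 ≤ 9 := by
  fin_cases hc <;> decide

theorem armtodice_eq (arm : Int) (c0 c1 c2 : Char) (rest : List Char)
    (hs : PySem.Int.toChars arm = c0 :: c1 :: c2 :: rest) :
    armtodice arm = ((PySem.Int.ofChars? [c0]).getD 0, (PySem.Int.ofChars? [c1]).getD 0,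
      (PySem.Int.ofChars? [c2]).getD 0) := by
  have h1 := PySem.List.pyGet?_natCast (c0 :: c1 :: c2 :: rest) 1
  have h2 := PySem.List.pyGet?_natCast (c0 :: c1 :: c2 :: rest) 2
  norm_num at h1 h2
  simp [armtodice, hs, h1, h2]

theorem A_bridge (arm dice v0 v1 v2 : Int) (ht : armtodice arm = (v0, v1, v2)) :
    armstep arm dice =
      (order_dice
        ((armstepWhile (3 - (stageA v0 v1 v2).length) (stageA v0 v1 v2) dice).1.getD 0 0)
        ((armstepWhile (3 - (stageA v0 v1 v2).length) (stageA v0 v1 v2) dice).1.getD 1 0)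
        ((armstepWhile (3 - (stageA v0 v1 v2).length) (stageA v0 v1 v2) dice).1.getD 2 0),
       (armstepWhile (3 - (stageA v0 v1 v2).length) (stageA v0 v1 v2) dice).2) := by
  simp only [armstep, ht]
  rfl

set_option maxHeartbeats 1000000 in
theorem B_bridge (arm dice : Int) (c0 c1 c2 : Char) (rest : List Char)
    (hs : PySem.Int.toChars arm = c0 :: c1 :: c2 :: rest) :
    armstep_alt arm dice =
      (emitB (altFill (3 - (Bkeep (countsOf3 ((PySem.Int.ofChars? [c0]).getD 0)
            ((PySem.Int.ofChars? [c1]).getD 0) ((PySem.Int.ofChars? [c2]).getD 0))).sum).toNat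
          (Bkeep (countsOf3 ((PySem.Int.ofChars? [c0]).getD 0)
            ((PySem.Int.ofChars? [c1]).getD 0) ((PySem.Int.ofChars? [c2]).getD 0))) dice).1,
       (altFill (3 - (Bkeep (countsOf3 ((PySem.Int.ofChars? [c0]).getD 0)
            ((PySem.Int.ofChars? [c1]).getD 0) ((PySem.Int.ofChars? [c2]).getD 0))).sum).toNat
          (Bkeep (countsOf3 ((PySem.Int.ofChars? [c0]).getD 0)
            ((PySem.Int.ofChars? [c1]).getD 0) ((PySem.Int.ofChars? [c2]).getD 0))) dice).2) := by
  have h0 : PySem.List.pyGet? (c0 :: c1 :: c2 :: rest) 0 = some c0 := by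
    simpa using PySem.List.pyGet?_natCast (c0 :: c1 :: c2 :: rest) 0
  have h1 : PySem.List.pyGet? (c0 :: c1 :: c2 :: rest) 1 = some c1 := by
    simpa using PySem.List.pyGet?_natCast (c0 :: c1 :: c2 :: rest) 1
  have h2 : PySem.List.pyGet? (c0 :: c1 :: c2 :: rest) 2 = some c2 := by
    simpa using PySem.List.pyGet?_natCast (c0 :: c1 :: c2 :: rest) 2
  simp only [armstep_alt, hs, h0, h1, h2, Option.getD_some]
  rfl

-- ===== VERDICT =====
theorem armstep_spec : Claim_equal_armstep := by
  intro arm dice _ hpre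
  show armstep arm dice = armstep_alt arm dice
  have hlen := toChars_len3 arm hpre
  have hdig := toChars_dig arm hpre
  obtain ⟨c0, c1, c2, rest, hs⟩ :
      ∃ c0 c1 c2 rest, PySem.Int.toChars arm = c0 :: c1 :: c2 :: rest := by
    rcases l : PySem.Int.toChars arm with _ | ⟨a, _ | ⟨b, _ | ⟨c, r⟩⟩⟩ <;>
      rw [l] at hlen <;> simp at hlen
    exact ⟨_, _, _, _, rfl⟩
  have hv0 := dig_val c0 (hdig c0 (by rw [hs]; simp))
  have hv1 := dig_val c1 (hdig c1 (by rw [hs]; simp))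
  have hv2 := dig_val c2 (hdig c2 (by rw [hs]; simp))
  rw [A_bridge arm dice _ _ _ (armtodice_eq arm c0 c1 c2 rest hs),
      B_bridge arm dice c0 c1 c2 rest hs]
  exact core _ _ _ dice hv0.1 hv0.2 hv1.1 hv1.2 hv2.1 hv2.2
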